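-- pv_equiv track=rewrite | github.com/pochiman/AlgoExpert | 04_Very_Hard/019_Rectangle_Mania.py | getCoordsTable
-- ===== SOURCE A (Python) =====
-- def getCoordsTable(coords):
--   coordsTable = {"x": {}, "y": {}}
--   for coord in coords:
--     x, y = coord
--     if x not in coordsTable["x"]:
--       coordsTable["x"][x] = []
--     coordsTable["x"][x].append(coord)
--     if y not in coordsTable["y"]:
--       coordsTable["y"][y] = []
--     coordsTable["y"][y].append(coord)
--   return coordsTable
-- ===== SOURCE B (Python) =====
-- def getCoordsTable(coords):
--   def group(key):
--     keys = dict.fromkeys(key(c) for c in coords)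
--     return {k: [c for c in coords if key(c) == k] for k in keys}
--   return {"x": group(lambda c: c[0]), "y": group(lambda c: c[1])}
-- ===== Notes on version B (the rewrite author's own statement) =====
-- stated objective: alternative
-- what changed: Replaces A's single pass that mutates two tables with conditional key initialisation by a dedup-keys-then-filter-per-key decomposition: the key order is computed once with dict.fromkeys and each group is a comprehension filtering the input.
import Mathlib
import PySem

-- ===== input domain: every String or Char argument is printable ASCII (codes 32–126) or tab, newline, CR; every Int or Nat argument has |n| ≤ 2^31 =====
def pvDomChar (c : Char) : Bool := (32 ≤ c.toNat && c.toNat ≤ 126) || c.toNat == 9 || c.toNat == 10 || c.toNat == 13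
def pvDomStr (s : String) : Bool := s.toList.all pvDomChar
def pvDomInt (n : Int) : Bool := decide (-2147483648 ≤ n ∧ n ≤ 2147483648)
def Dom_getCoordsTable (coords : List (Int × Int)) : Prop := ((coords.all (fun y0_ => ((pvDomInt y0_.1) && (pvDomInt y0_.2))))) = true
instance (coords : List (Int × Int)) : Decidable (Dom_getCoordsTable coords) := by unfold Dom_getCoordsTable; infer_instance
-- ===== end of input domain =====

-- B replaces A's single mutating pass by a dedup-keys-then-filter-per-key decomposition (alternative structure, same results).

-- ===== PORT A =====
-- the body of A's loop for one axis table: "if k not in table: table[k] = []; table[k].append(coord)"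
def pvStepA (d : PySem.Dict Int (List (Int × Int))) (k : Int) (c : Int × Int) :
    PySem.Dict Int (List (Int × Int)) :=
  let d1 := if d.contains k then d else d.insert k []
  d1.modify k [] (fun l => l ++ [c])

def getCoordsTable (coords : List (Int × Int)) : List (String × List (Int × List (Int × Int))) :=
  let st := coords.foldl
    (fun (t : PySem.Dict Int (List (Int × Int)) × PySem.Dict Int (List (Int × Int))) c =>
      (pvStepA t.1 c.1 c, pvStepA t.2 c.2 c))
    (PySem.Dict.empty, PySem.Dict.empty)
  [("x", st.1.items), ("y", st.2.items)]

-- ===== PORT B =====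
-- one axis table of B: keys via dict.fromkeys (ordered dedup), each group a filtering comprehension
def pvGroupB (key : (Int × Int) → Int) (coords : List (Int × Int)) : List (Int × List (Int × Int)) :=
  (PySem.List.dedup (coords.map key)).map (fun k => (k, coords.filter (fun c => key c == k)))

def getCoordsTable_alt (coords : List (Int × Int)) : List (String × List (Int × List (Int × Int))) :=
  [("x", pvGroupB (fun c => c.1) coords), ("y", pvGroupB (fun c => c.2) coords)]

-- ===== PRECONDITION & SPEC =====
def Spec_getCoordsTable (coords : List (Int × Int)) (out : List (String × List (Int × List (Int × Int)))) : Prop := out = getCoordsTable_alt coords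
instance (coords : List (Int × Int)) (out : List (String × List (Int × List (Int × Int)))) : Decidable (Spec_getCoordsTable coords out) := by unfold Spec_getCoordsTable; infer_instance

-- ===== CLAIM (what is proved, stated in full; the proofs are below) =====
def Claim_equal_getCoordsTable : Prop := ∀ (coords : List (Int × Int)), Dom_getCoordsTable coords → Spec_getCoordsTable coords (getCoordsTable coords)

-- ===== LEMMAS AND PROOFS =====

-- A's "ensure key then append" equals a single modify with default []
lemma pvStepA_eq_modify (d : PySem.Dict Int (List (Int × Int))) (k : Int) (c : Int × Int) :
    pvStepA d k c = d.modify k [] (fun l => l ++ [c]) := by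
  unfold pvStepA
  rcases h : d.contains k
  case true => simp
  case false =>
    have hk : k ∉ d.items.map (·.1) := by
      intro hm
      rw [show d.items.map (·.1) = d.keys from rfl] at hm
      rw [← PySem.Dict.contains_iff_mem_keys] at hm
      simp [h] at hm
    have hins : (PySem.Dict.mk (d.items ++ [(k, [])]) : PySem.Dict Int (List (Int × Int))) = d.insert k [] := by
      apply PySem.Dict.ext
      rw [PySem.Dict.items_insert_of_not_contains (h := h)]
    simp only [PySem.Dict.modify, PySem.Dict.insert, h, Bool.false_eq_true, ↓reduceIte,
      PySem.Dict.contains_mk, List.any_append, List.any_cons, BEq.rfl, List.any_nil, Bool.or_false,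
      Bool.or_true, beq_iff_eq, List.map_append, List.map_cons, List.map_nil, PySem.Dict.mk.injEq,
      List.append_singleton_inj, Prod.mk.injEq, List.append_cancel_right_eq, true_and]
    constructor
    · have : ∀ p ∈ d.items, (if p.1 = k then (k, (PySem.Dict.mk (d.items ++ [(k, [])])).getD k [] ++ [c]) else p) = p := by
        intro p hp
        rw [if_neg]
        intro he; exact hk (he ▸ List.mem_map_of_mem hp)
      rw [List.map_congr_left this]; simp
    · rw [hins, PySem.Dict.getD_insert_self, PySem.Dict.getD_of_not_contains (h := h)]

-- one axis of A's fold equals B's group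
lemma pvFold_eq_group (key : (Int × Int) → Int) (coords : List (Int × Int)) :
    (coords.foldl (fun d c => pvStepA d (key c) c) PySem.Dict.empty).items
      = pvGroupB key coords := by
  simp only [pvStepA_eq_modify]
  have hnd : (coords.foldl (fun d c => d.modify (key c) [] (fun l => l ++ [c])) PySem.Dict.empty).keys.Nodup :=
    PySem.Dict.nodup_keys_foldl_modify_key coords key [] _ _ PySem.Dict.nodup_keys_empty
  rw [PySem.Dict.items_eq_map_keys _ hnd []]
  have hkeys : (coords.foldl (fun d c => d.modify (key c) [] (fun l => l ++ [c])) PySem.Dict.empty).keys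
      = PySem.List.dedup (coords.map key) := by
    rw [PySem.Dict.keys_foldl_modify_key]
    simp [PySem.Set.update_nil_left]
  rw [hkeys, pvGroupB]
  apply List.map_congr_left
  intro k _
  have hfold : coords.foldl (fun d c => d.modify (key c) [] (fun l => l ++ [c])) PySem.Dict.empty
      = (coords.map (fun c => (key c, c))).foldl (fun d p => d.modify p.1 [] (fun l => l ++ [p.2])) PySem.Dict.empty := by
    rw [List.foldl_map]
  rw [hfold, PySem.Dict.getD_foldl_modify_append, List.filter_map, List.map_map]
  simp [Function.comp_def]

-- ===== VERDICT (by name: the statement is the Claim_ definition above) =====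
theorem getCoordsTable_spec : Claim_equal_getCoordsTable := by
  intro coords _
  show _ = _
  unfold getCoordsTable getCoordsTable_alt
  rw [PySem.List.foldl_prod_mk (f := fun d (c : Int × Int) => pvStepA d c.1 c)
      (g := fun d (c : Int × Int) => pvStepA d c.2 c)]
  simp only [pvFold_eq_group (fun c => c.1), pvFold_eq_group (fun c => c.2)]
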